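-- pv_equiv track=rewrite | github.com/udonehn/Algorithm | 백준/Gold/24508. 나도리팡/나도리팡.py | solve
-- ===== SOURCE A (Python) =====
-- from collections import deque
--
-- def solve(N, K, T, arr):
--     if sum(arr) % K != 0:
--         return "NO"
--
--     arr.sort()
--     while arr[-1] > K:
--         arr[-1] -= K
--         arr.sort()
--     arr = deque(arr)
--     while arr and arr[0] == 0:
--         arr.popleft()
--
--     chance = T
--     while arr:
--         if K - arr[-1] > chance:
--             return "NO"
--         if arr[0] + arr[-1] == K:
--             chance -= arr[0]
--             arr.pop()
--             arr.popleft()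
--         elif arr[0] + arr[-1] > K:
--             arr[0] -= K - arr[-1]
--             chance -= K - arr[-1]
--             arr.pop()
--         elif arr[0] + arr[-1] < K:
--             arr[-1] += arr[0]
--             chance -= arr[0]
--             arr.popleft()
--     return "YES"
-- ===== SOURCE B (Python) =====
-- # Same result as A via direct modular reduction + one sort + closed-form cost (sum of the n-m smallest reduced piles); A sorts arr in place, B does not mutate arr.
-- def solve(N, K, T, arr):
--     if sum(arr) % K != 0:
--         return "NO"
--     red = sorted(v if v <= K else (v - 1) % K + 1 for v in arr)
--     m = sum(red) // K
--     need = sum(red[:len(red) - m])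
--     return "YES" if need <= T else "NO"
-- ===== Notes on version B (the rewrite author's own statement) =====
-- stated objective: simpler
-- what changed: Replaces the repeated subtract-K-then-resort loop and the destructive two-ended greedy simulation by a direct per-element modular reduction, one sort, and a closed-form cost (sum of the n-m smallest reduced values, m = sum/K) compared with T.
-- outside the precondition, e.g. on solve(2, 2, 0, [-1, 3]): A returns 'NO', B returns 'YES'; on solve(1, 1, -1, [0]): A returns 'YES', B returns 'NO'; on solve(1, -2, 5, [-4]): A returns 'YES', B returns 'YES'
import Mathlib
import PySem

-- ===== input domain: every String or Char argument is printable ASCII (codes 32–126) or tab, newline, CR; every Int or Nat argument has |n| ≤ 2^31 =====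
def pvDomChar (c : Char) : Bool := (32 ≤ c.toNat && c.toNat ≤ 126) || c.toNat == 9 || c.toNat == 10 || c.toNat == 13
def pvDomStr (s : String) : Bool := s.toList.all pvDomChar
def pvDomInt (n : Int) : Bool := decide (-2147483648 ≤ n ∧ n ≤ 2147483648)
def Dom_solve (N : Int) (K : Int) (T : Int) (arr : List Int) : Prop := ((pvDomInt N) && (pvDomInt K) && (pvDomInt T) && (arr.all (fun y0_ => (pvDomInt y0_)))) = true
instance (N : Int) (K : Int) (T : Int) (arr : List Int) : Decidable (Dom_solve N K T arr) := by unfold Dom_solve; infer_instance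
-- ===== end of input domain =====

-- B replaces A's repeated subtract-K-and-resort loop plus destructive two-ended greedy by a
-- per-element modular reduction, one sort and a closed-form cost comparison (objective: simpler).
-- A sorts/mutates its arr argument in place; B does not — the equivalence proved is about the return value.

-- ===== PORT A =====
-- fuel bound for A's subtract-and-resort loop (totality only; sufficient whenever 0 < K —
-- for K ≤ 0 with an element above K the Python loop diverges, which Pre_solve excludes)
def phase1Fuel (K : Int) (l : List Int) : Nat := (l.map (fun v => (v - K).toNat)).sum

-- 'while arr[-1] > K: arr[-1] -= K; arr.sort()'
def phase1 (K : Int) : Nat → List Int → List Int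
  | 0, l => l
  | fuel+1, l =>
    match l.getLast? with
    | none => l          -- Python raises IndexError on empty arr; Pre_solve excludes arr = []
    | some b => if K < b then phase1 K fuel (PySem.List.sorted (l.dropLast ++ [b - K]) (fun x => x)) else l

-- 'while arr and arr[0] == 0: arr.popleft()'
def stripZeros : List Int → List Int
  | [] => []
  | a :: rest => if a = 0 then stripZeros rest else a :: rest

-- 'chance = T; while arr: …' — the greedy loop on the deque
def loopA (K : Int) (chance : Int) (l : List Int) : String :=
  match l with
  | [] => "YES"
  | a :: rest =>
    let b := (a :: rest).getLast (by simp)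
    if K - b > chance then "NO"
    else if a + b = K then
      -- chance -= arr[0]; arr.pop(); arr.popleft()   (popleft of the emptied singleton would
      -- raise in Python; unreachable under Pre_solve: the remaining sum is always divisible by K)
      loopA K (chance - a) (((a :: rest).dropLast).drop 1)
    else if a + b > K then
      -- arr[0] -= K - arr[-1]; chance -= K - arr[-1]; arr.pop()
      loopA K (chance - (K - b)) (((a - (K - b)) :: rest).dropLast)
    else
      -- arr[-1] += arr[0]; chance -= arr[0]; arr.popleft()
      loopA K (chance - a) (((a :: rest).dropLast ++ [b + a]).drop 1)
  termination_by l.length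
  decreasing_by all_goals (simp only [List.length_drop, List.length_dropLast, List.length_cons, List.length_append, List.length_nil]; omega)

def solve (N : Int) (K : Int) (T : Int) (arr : List Int) : String :=
  if PySem.Int.mod arr.sum K ≠ 0 then "NO"
  else
    let s := PySem.List.sorted arr (fun x => x)
    loopA K T (stripZeros (phase1 K (phase1Fuel K s) s))

-- ===== PORT B =====
-- 'v if v <= K else (v - 1) % K + 1'
def reduceK (K : Int) (v : Int) : Int := if v ≤ K then v else PySem.Int.mod (v - 1) K + 1

def solve_alt (N : Int) (K : Int) (T : Int) (arr : List Int) : String :=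
  if PySem.Int.mod arr.sum K ≠ 0 then "NO"
  else
    let red := PySem.List.sorted (arr.map (reduceK K)) (fun x => x)
    let m := PySem.Int.floordiv red.sum K
    let need := (PySem.List.slice red none (some ((red.length : Int) - m))).sum
    if need ≤ T then "YES" else "NO"

-- ===== PRECONDITION & SPEC =====
-- Pre_solve: K ≠ 0 (A raises ZeroDivisionError on K = 0), and beyond the trivial
-- sum-not-divisible "NO" branch it restricts to the problem's natural domain (0 < K, nonempty
-- arr of nonnegative candy counts, and not the degenerate all-zero arr with T < 0): A raises
-- IndexError on arr = [] and diverges for K < 0 with an element above K; negative counts and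
-- the all-zero-with-negative-T corner are outside the candy problem's domain (claim cites give
-- excluded inputs on which A still returns).
def Pre_solve (N : Int) (K : Int) (T : Int) (arr : List Int) : Prop :=
  K ≠ 0 ∧ (PySem.Int.mod arr.sum K ≠ 0 ∨
    (0 < K ∧ arr ≠ [] ∧ (∀ v ∈ arr, 0 ≤ v) ∧ (0 ≤ T ∨ ∃ v ∈ arr, v ≠ 0)))
instance (N : Int) (K : Int) (T : Int) (arr : List Int) : Decidable (Pre_solve N K T arr) := by
  unfold Pre_solve; infer_instance

def pvWitness_solve : Int × Int × Int × List Int := (3, 3, 2, [1, 2, 6])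

def Spec_solve (N : Int) (K : Int) (T : Int) (arr : List Int) (out : String) : Prop := out = solve_alt N K T arr
instance (N : Int) (K : Int) (T : Int) (arr : List Int) (out : String) : Decidable (Spec_solve N K T arr out) := by unfold Spec_solve; infer_instance

-- ===== CLAIM (what is proved, stated in full; the proofs are below) =====
def Claim_equal_solve : Prop := ∀ (N : Int) (K : Int) (T : Int) (arr : List Int), Dom_solve N K T arr → Pre_solve N K T arr → Spec_solve N K T arr (solve N K T arr)

-- ===== LEMMAS AND PROOFS =====

lemma reduceK_bounds {K v : Int} (hK : 0 < K) (hv : 0 ≤ v) :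
    0 ≤ reduceK K v ∧ reduceK K v ≤ K := by
  unfold reduceK
  split_ifs with h
  · omega
  · rw [PySem.Int.mod_eq_emod_of_pos hK]
    have h1 := Int.emod_nonneg (v - 1) (by omega : K ≠ 0)
    have h2 := Int.emod_lt_of_pos (v - 1) hK
    omega

lemma reduceK_pos {K v : Int} (hK : 0 < K) (hv : 0 < v) : 0 < reduceK K v := by
  unfold reduceK
  split_ifs with h
  · omega
  · rw [PySem.Int.mod_eq_emod_of_pos hK]
    have h1 := Int.emod_nonneg (v - 1) (by omega : K ≠ 0)
    omega

lemma reduceK_dvd_sub {K v : Int} (hK : 0 < K) : K ∣ (v - reduceK K v) := by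
  unfold reduceK
  split_ifs with h
  · simp
  · rw [PySem.Int.mod_eq_emod_of_pos hK]
    have : v - ((v - 1) % K + 1) = K * ((v - 1) / K) := by
      have := Int.emod_add_ediv (v - 1) K
      omega
    rw [this]
    exact Dvd.intro _ rfl

lemma reduceK_sub_K {K v : Int} (hK : 0 < K) (h : K < v) :
    reduceK K (v - K) = reduceK K v := by
  unfold reduceK
  simp only [PySem.Int.mod_eq_emod_of_pos hK]
  rw [if_neg (by omega : ¬ v ≤ K)]
  split_ifs with h2
  · have h3 : (v - 1) % K = v - 1 - K := by
      have he : (v - 1) % K = (v - 1 - K) % K := (Int.sub_emod_right (v-1) K).symm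
      rw [he, Int.emod_eq_of_lt (by omega) (by omega)]
    omega
  · have he : v - K - 1 = v - 1 - K := by ring
    rw [he, Int.sub_emod_right]

lemma le_getLast_of_pairwise {l : List Int} (hp : l.Pairwise (· ≤ ·)) (hne : l ≠ [])
    {x : Int} (hx : x ∈ l) : x ≤ l.getLast hne := by
  induction l with
  | nil => simp at hx
  | cons a rest ih =>
    rcases eq_or_ne rest [] with rfl | hr
    · simp at hx; simp [hx, List.getLast]
    · rw [List.getLast_cons hr]
      rcases List.mem_cons.mp hx with rfl | hx'
      · exact le_trans ((List.pairwise_cons.mp hp).1 _ (List.getLast_mem hr)) le_rfl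
      · exact ih (List.Pairwise.of_cons hp) hr hx'

lemma fuel_perm {K : Int} {l l' : List Int} (h : l.Perm l') : phase1Fuel K l = phase1Fuel K l' := by
  unfold phase1Fuel; exact List.Perm.sum_eq (h.map _)

lemma map_reduceK_eq_self {K : Int} {l : List Int} (h : ∀ x ∈ l, x ≤ K) :
    l.map (reduceK K) = l := by
  have h2 : l.map (reduceK K) = l.map id :=
    List.map_congr_left (fun x hx => by unfold reduceK; rw [if_pos (h x hx)]; rfl)
  rw [h2, List.map_id]

lemma phase1_eq {K : Int} (hK : 0 < K) :
    ∀ (fuel : Nat) (l : List Int), l.Pairwise (· ≤ ·) → phase1Fuel K l ≤ fuel →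
      phase1 K fuel l = PySem.List.sorted (l.map (reduceK K)) (fun x => x) := by
  intro fuel
  induction fuel with
  | zero =>
    intro l hp hf
    have hall : ∀ x ∈ l, x ≤ K := by
      intro x hx
      have h0 : (x - K).toNat = 0 := by
        have hz : ((l.map (fun v => (v - K).toNat)).sum = 0) := by
          unfold phase1Fuel at hf; omega
        exact List.sum_eq_zero_iff.mp hz _ (List.mem_map_of_mem hx)
      omega
    rw [phase1, map_reduceK_eq_self hall,
        PySem.List.sorted_eq_self_of_pairwise _ _ (by simpa using hp)]
  | succ fuel ih =>
    intro l hp hf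
    rw [phase1]
    cases hl : l.getLast? with
    | none =>
      rw [List.getLast?_eq_none_iff.mp hl]
      rfl
    | some b =>
      have hne : l ≠ [] := by rintro rfl; simp at hl
      have hb : l.getLast hne = b := by
        have := l.getLast?_eq_getLast hne
        rw [this] at hl; exact (Option.some_inj.mp hl)
      have hdecomp : l.dropLast ++ [b] = l := by
        rw [← hb]; exact List.dropLast_append_getLast hne
      change (if K < b then phase1 K fuel (PySem.List.sorted (l.dropLast ++ [b - K]) fun x => x) else l)
        = PySem.List.sorted (l.map (reduceK K)) (fun x => x)
      by_cases hKb : K < b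
      · rw [if_pos hKb]
        have hperm : (PySem.List.sorted (l.dropLast ++ [b - K]) (fun x => x)).Perm
            (l.dropLast ++ [b - K]) := PySem.List.sorted_perm _ _ _
        have hfuel' : phase1Fuel K (PySem.List.sorted (l.dropLast ++ [b - K]) (fun x => x)) ≤ fuel := by
          have h1 := fuel_perm (K := K) hperm
          have h2 : phase1Fuel K (l.dropLast ++ [b - K])
              = phase1Fuel K l.dropLast + (b - K - K).toNat := by
            unfold phase1Fuel; simp
          have h3 : phase1Fuel K l = phase1Fuel K l.dropLast + (b - K).toNat := by
            conv_lhs => rw [← hdecomp]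
            unfold phase1Fuel; simp
          omega
        rw [ih _ (by simpa using PySem.List.sorted_pairwise _ _) hfuel']
        apply PySem.List.sorted_eq_sorted_of_perm _ _ _ (fun a b h => h)
        have : ((PySem.List.sorted (l.dropLast ++ [b - K]) (fun x => x)).map (reduceK K)).Perm
            ((l.dropLast ++ [b - K]).map (reduceK K)) := hperm.map _
        refine this.trans ?_
        rw [show (l.dropLast ++ [b - K]).map (reduceK K)
            = List.map (reduceK K) l.dropLast ++ [reduceK K (b - K)] by simp]
        rw [reduceK_sub_K hK hKb]
        rw [show List.map (reduceK K) l.dropLast ++ [reduceK K b]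
            = List.map (reduceK K) (l.dropLast ++ [b]) by simp, hdecomp]
      · rw [if_neg hKb]
        have hall : ∀ x ∈ l, x ≤ K := fun x hx =>
          le_trans (hb ▸ le_getLast_of_pairwise hp hne hx) (not_lt.mp hKb)
        rw [map_reduceK_eq_self hall,
            PySem.List.sorted_eq_self_of_pairwise _ _ (by simpa using hp)]

lemma stripZeros_decomp (l : List Int) :
    ∃ z : Nat, l = List.replicate z 0 ++ stripZeros l := by
  induction l with
  | nil => exact ⟨0, rfl⟩
  | cons a rest ih =>
    by_cases h : a = 0
    · obtain ⟨z, hz⟩ := ih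
      exact ⟨z + 1, by simp [stripZeros, h, List.replicate_succ]; exact hz⟩
    · exact ⟨0, by simp [stripZeros, h]⟩

lemma stripZeros_pos {l : List Int} (hp : l.Pairwise (· ≤ ·)) (hn : ∀ x ∈ l, 0 ≤ x) :
    ∀ x ∈ stripZeros l, 0 < x := by
  induction l with
  | nil => simp [stripZeros]
  | cons a rest ih =>
    simp only [stripZeros]
    split_ifs with h
    · exact ih (List.Pairwise.of_cons hp) (fun x hx => hn x (List.mem_cons_of_mem a hx))
    · intro x hx
      rcases List.mem_cons.mp hx with rfl | hx
      · have := hn x (List.mem_cons_self ..); omega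
      · have h1 := (List.pairwise_cons.mp hp).1 x hx
        have h2 := hn a (List.mem_cons_self ..)
        omega

lemma sum_le_mul_of_le {l : List Int} {K : Int} (h : ∀ x ∈ l, x ≤ K) :
    l.sum ≤ (l.length : Int) * K := by
  have := List.sum_le_card_nsmul l K h
  simpa [nsmul_eq_mul] using this

lemma M_le_length {K : Int} {l : List Int} {M : Nat} (hK : 0 < K)
    (hb : ∀ v ∈ l, v ≤ K) (hsum : l.sum = (M : Int) * K) : M ≤ l.length := by
  have hs := sum_le_mul_of_le hb
  rw [hsum] at hs
  have : (M : Int) ≤ (l.length : Int) := le_of_mul_le_mul_right hs hK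
  exact_mod_cast this

lemma take_sum_nonneg {l : List Int} (hb : ∀ v ∈ l, 0 < v) (k : Nat) : 0 ≤ (l.take k).sum :=
  List.sum_nonneg (fun x hx => le_of_lt (hb x (List.mem_of_mem_take hx)))

lemma need_ge_K_sub_last {K : Int} {l : List Int} {M : Nat} (hK : 0 < K)
    (hp : l.Pairwise (· ≤ ·)) (hb : ∀ v ∈ l, 0 < v ∧ v ≤ K)
    (hsum : l.sum = (M : Int) * K) (hM1 : 1 ≤ M) (hne : l ≠ []) :
    K - l.getLast hne ≤ (l.take (l.length - M)).sum := by
  have hMn : M ≤ l.length := M_le_length hK (fun v hv => (hb v hv).2) hsum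
  have hdlen : (l.drop (l.length - M)).length = M := by simp; omega
  have hdne : l.drop (l.length - M) ≠ [] := by
    intro h; rw [h] at hdlen; simp at hdlen; omega
  have hsub : ∀ x ∈ l.drop (l.length - M), x ∈ l := fun x hx => List.mem_of_mem_drop hx
  have h1 : (l.drop (l.length - M)).dropLast.sum ≤ (((M : Int) - 1)) * K := by
    have hle : ∀ x ∈ (l.drop (l.length - M)).dropLast, x ≤ K :=
      fun x hx => (hb x (hsub x ((List.dropLast_sublist _).mem hx))).2
    have := sum_le_mul_of_le hle
    have hlen2 : ((l.drop (l.length - M)).dropLast.length : Int) = (M : Int) - 1 := by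
      simp [hdlen]; omega
    rw [hlen2] at this; exact this
  have h2 : (l.drop (l.length - M)).getLast hdne ≤ l.getLast hne :=
    le_getLast_of_pairwise hp hne (hsub _ (List.getLast_mem hdne))
  have h3 : (l.drop (l.length - M)).dropLast.sum + (l.drop (l.length - M)).getLast hdne
      = (l.drop (l.length - M)).sum := by
    conv_rhs => rw [← List.dropLast_append_getLast hdne]
    rw [List.sum_append]; simp
  have h4 := List.sum_take_add_sum_drop l (l.length - M)
  rw [hsum] at h4
  linarith

lemma take_cons_append_sum {a b : Int} {mid : List Int} {M : Nat} (hM1 : 1 ≤ M)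
    (hMn : M ≤ mid.length + 1) :
    ((a :: (mid ++ [b])).take ((a :: (mid ++ [b])).length - M)).sum
      = a + (mid.take (mid.length + 1 - M)).sum := by
  have hlen : (a :: (mid ++ [b])).length = mid.length + 2 := by simp
  rw [hlen]
  have h1 : mid.length + 2 - M = (mid.length + 1 - M) + 1 := by omega
  rw [h1, List.take_succ_cons, List.sum_cons]
  congr 1
  rw [List.take_append, Nat.sub_eq_zero_of_le (by omega : mid.length + 1 - M ≤ mid.length)]
  simp

lemma take_append_singleton_sum {b : Int} {mid : List Int} {k : Nat} (h : k ≤ mid.length) :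
    ((mid ++ [b]).take k).sum = (mid.take k).sum := by
  rw [List.take_append, Nat.sub_eq_zero_of_le h]
  simp

lemma ge_K_of_sum_full {K : Int} {l : List Int} {x : Int} (_hK : 0 < K) (hx : x ∈ l)
    (hb : ∀ v ∈ l, v ≤ K) (hsum : l.sum = (l.length : Int) * K) : K ≤ x := by
  have h1 := List.sum_erase hx
  have h2 : (l.erase x).sum ≤ ((l.erase x).length : Int) * K :=
    sum_le_mul_of_le (fun v hv => hb v (List.mem_of_mem_erase hv))
  have h3 : (l.erase x).length = l.length - 1 := by rw [List.length_erase, if_pos hx]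
  have h4 : 1 ≤ l.length := List.length_pos_of_mem hx
  have h5 : ((l.erase x).length : Int) = (l.length : Int) - 1 := by rw [h3]; omega
  rw [h5] at h2
  nlinarith [h2, h1, hsum]

lemma loopA_cons {K c a b : Int} {rest : List Int}
    (hb : (a :: rest).getLast (by simp) = b) :
    loopA K c (a :: rest) =
      (if K - b > c then "NO"
       else if a + b = K then loopA K (c - a) (((a :: rest).dropLast).drop 1)
       else if a + b > K then loopA K (c - (K - b)) (((a - (K - b)) :: rest).dropLast)
       else loopA K (c - a) (((a :: rest).dropLast ++ [b + a]).drop 1)) := by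
  subst hb; rw [loopA]

lemma loopA_eq {K : Int} (hK : 0 < K) :
    ∀ (n : Nat) (l : List Int) (c : Int) (M : Nat), l.length ≤ n → l.Pairwise (· ≤ ·) →
      (∀ v ∈ l, 0 < v ∧ v ≤ K) → l.sum = (M : Int) * K → (l = [] → 0 ≤ c) →
      loopA K c l = if (l.take (l.length - M)).sum ≤ c then "YES" else "NO" := by
  intro n
  induction n with
  | zero =>
    intro l c M hlen hp hb hsum hc
    have hnil : l = [] := List.length_eq_zero_iff.mp (Nat.le_zero.mp hlen)
    subst hnil
    rw [loopA, if_pos (by simpa using hc rfl)]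
  | succ n ih =>
    intro l c M hlen hp hb hsum hc
    cases l with
    | nil => rw [loopA, if_pos (by simpa using hc rfl)]
    | cons a rest =>
      have hM1 : 1 ≤ M := by
        by_contra h
        have hM0 : M = 0 := by omega
        subst hM0
        have hpos : 0 < (a :: rest).sum := by
          rw [List.sum_cons]
          have h1 := (hb a (List.mem_cons_self ..)).1
          have h2 := List.sum_nonneg
            (fun x hx => le_of_lt (hb x (List.mem_cons_of_mem a hx)).1)
          omega
        rw [hsum] at hpos; simp at hpos
      rcases eq_or_ne rest [] with rfl | hrne
      · -- singleton: a = K and M = 1 are forced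
        have hsa : a = (M : Int) * K := by simpa using hsum
        have haK : a = K ∧ M = 1 := by
          have h1 := (hb a (List.mem_cons_self ..)).2
          have h2 := (hb a (List.mem_cons_self ..)).1
          have h3 : (1 : Int) ≤ (M : Int) := by exact_mod_cast hM1
          constructor
          · nlinarith
          · have : (M : Int) = 1 := by nlinarith
            exact_mod_cast this
        obtain ⟨haK, hM⟩ := haK
        subst haK hM
        rw [loopA_cons (List.getLast_singleton _)]
        by_cases hc0 : a - a > c
        · rw [if_pos hc0, if_neg (by simp; omega)]
        · rw [if_neg hc0, if_neg (by omega : ¬ a + a = a), if_pos (by omega : a + a > a)]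
          have hnil2 : ((a - (a - a)) :: ([] : List Int)).dropLast = [] := by simp
          rw [hnil2, loopA, if_pos (by simp; omega)]
      · -- rest = mid ++ [b]
        obtain ⟨b, hbdef⟩ : ∃ x, (a :: rest).getLast (by simp) = x := ⟨_, rfl⟩
        have hrg : rest.getLast hrne = b := by rw [← List.getLast_cons hrne]; exact hbdef
        have hrest : rest.dropLast ++ [b] = rest := by
          rw [← hrg]; exact List.dropLast_append_getLast hrne
        set mid := rest.dropLast with hmid
        have hbmem : b ∈ a :: rest := hbdef ▸ List.getLast_mem _
        have hamem : a ∈ a :: rest := List.mem_cons_self ..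
        have hble : ∀ x ∈ a :: rest, x ≤ b := fun x hx =>
          hbdef ▸ le_getLast_of_pairwise hp (by simp) hx
        have hmidmem : ∀ x ∈ mid, x ∈ a :: rest := fun x hx =>
          List.mem_cons_of_mem a ((List.dropLast_sublist rest).mem hx)
        have hmidp : mid.Pairwise (· ≤ ·) :=
          hp.sublist ((List.dropLast_sublist rest).trans (List.sublist_cons_self a rest))
        have hmidb : ∀ v ∈ mid, 0 < v ∧ v ≤ K := fun v hv => hb v (hmidmem v hv)
        have halex : ∀ x ∈ rest, a ≤ x := (List.pairwise_cons.mp hp).1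
        have hlen2 : (a :: rest).length = mid.length + 2 := by
          conv_lhs => rw [← hrest]; simp
        have hsum2 : a + mid.sum + b = (M : Int) * K := by
          have : (a :: rest).sum = a + (mid.sum + b) := by
            conv_lhs => rw [← hrest]
            simp
          rw [this] at hsum; omega
        have hmidsumle : mid.sum ≤ (mid.length : Int) * K :=
          sum_le_mul_of_le (fun v hv => (hmidb v hv).2)
        have hneed := need_ge_K_sub_last hK hp hb hsum hM1 (by simp)
        rw [hbdef] at hneed
        have hneednn : 0 ≤ ((a :: rest).take ((a :: rest).length - M)).sum :=
          take_sum_nonneg (fun v hv => (hb v hv).1) _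
        rw [loopA_cons hbdef]
        by_cases hg : K - b > c
        · rw [if_pos hg, if_neg (by omega)]
        · rw [if_neg hg]
          by_cases h2 : a + b = K
          · -- equal branch: remove both ends
            rw [if_pos h2]
            have hMle : M ≤ mid.length + 1 := by
              have : (M : Int) * K ≤ ((mid.length : Int) + 1) * K := by nlinarith
              have : (M : Int) ≤ (mid.length : Int) + 1 := le_of_mul_le_mul_right this hK
              omega
            have hl' : ((a :: rest).dropLast).drop 1 = mid := by
              rw [List.dropLast_cons_of_ne_nil hrne]; rfl
            have hmidsum : mid.sum = ((M - 1 : Nat) : Int) * K := by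
              push_cast [Nat.cast_sub hM1]
              nlinarith [hsum2]
            rw [hl', ih mid (c - a) (M - 1) (by omega) hmidp hmidb hmidsum
                (fun _ => by omega)]
            have hneq : ((a :: rest).take ((a :: rest).length - M)).sum
                = a + (mid.take (mid.length + 1 - M)).sum := by
              conv_lhs => rw [← hrest]
              exact take_cons_append_sum hM1 hMle
            rw [hneq, show mid.length - (M - 1) = mid.length + 1 - M from by omega]
            exact if_congr ⟨fun h => by omega, fun h => by omega⟩ rfl rfl
          · rw [if_neg h2]
            by_cases h3 : a + b > K
            · -- greater branch: fill up b from a, remove b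
              rw [if_pos h3]
              have hl' : ((a - (K - b)) :: rest).dropLast = (a - (K - b)) :: mid := by
                rw [List.dropLast_cons_of_ne_nil hrne]
              rw [hl']
              have hpair' : ((a - (K - b)) :: mid).Pairwise (· ≤ ·) := by
                rw [List.pairwise_cons]
                exact ⟨fun x hx => by
                  have h5 := halex x ((List.dropLast_sublist rest).mem hx)
                  have h6 := (hb b hbmem).2
                  omega, hmidp⟩
              have hb' : ∀ v ∈ (a - (K - b)) :: mid, 0 < v ∧ v ≤ K := by
                intro v hv
                rcases List.mem_cons.mp hv with rfl | hv'
                · have h6 := (hb b hbmem).2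
                  have h7 := (hb a hamem)
                  omega
                · exact hmidb v hv'
              have hsum' : ((a - (K - b)) :: mid).sum = ((M - 1 : Nat) : Int) * K := by
                rw [List.sum_cons]
                push_cast [Nat.cast_sub hM1]
                nlinarith [hsum2]
              rw [ih _ (c - (K - b)) (M - 1) (by simp; omega) hpair' hb' hsum'
                  (fun h => by simp at h)]
              by_cases hMfull : M = mid.length + 2
              · -- all piles already full: both sides are 'if 0 ≤ …'
                have hsumfull : (a :: rest).sum = ((a :: rest).length : Int) * K := by
                  rw [hsum, hlen2, hMfull]
                have hbK : b = K :=
                  le_antisymm (hb b hbmem).2 (ge_K_of_sum_full hK hbmem (fun v hv => (hb v hv).2) hsumfull)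
                have htake0 : (a :: rest).length - M = 0 := by omega
                have htake0' : ((a - (K - b)) :: mid).length - (M - 1) = 0 := by simp; omega
                rw [htake0] at hneednn ⊢
                rw [htake0']
                simp only [List.take_zero, List.sum_nil]
                rw [if_pos (by omega), if_pos (by omega)]
              · have hMle : M ≤ mid.length + 1 := by
                  have := M_le_length hK (fun v hv => (hb v hv).2) hsum
                  rw [hlen2] at this; omega
                have hneq : ((a :: rest).take ((a :: rest).length - M)).sum
                    = a + (mid.take (mid.length + 1 - M)).sum := by
                  conv_lhs => rw [← hrest]
                  exact take_cons_append_sum hM1 hMle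
                have hneq' : (((a - (K - b)) :: mid).take (((a - (K - b)) :: mid).length - (M - 1))).sum
                    = (a - (K - b)) + (mid.take (mid.length + 1 - M)).sum := by
                  have hidx : ((a - (K - b)) :: mid).length - (M - 1) = (mid.length + 1 - M) + 1 := by
                    simp; omega
                  rw [hidx, List.take_succ_cons, List.sum_cons]
                rw [hneq, hneq']
                exact if_congr ⟨fun h => by omega, fun h => by omega⟩ rfl rfl
            · -- smaller branch: merge a into b
              rw [if_neg h3]
              have h4 : a + b < K := by omega
              have hMle : M ≤ mid.length + 1 := by
                have : (M : Int) * K < ((mid.length : Int) + 1) * K := by nlinarith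
                have : (M : Int) < (mid.length : Int) + 1 := lt_of_mul_lt_mul_right this (le_of_lt hK)
                omega
              have hl' : ((a :: rest).dropLast ++ [b + a]).drop 1 = mid ++ [b + a] := by
                rw [List.dropLast_cons_of_ne_nil hrne]; rfl
              rw [hl']
              have hpair' : (mid ++ [b + a]).Pairwise (· ≤ ·) := by
                rw [List.pairwise_append]
                refine ⟨hmidp, by simp, ?_⟩
                intro x hx y hy
                rcases List.mem_singleton.mp hy with rfl
                have h5 := hble x (hmidmem x hx)
                have h6 := (hb a hamem).1
                omega
              have hb' : ∀ v ∈ mid ++ [b + a], 0 < v ∧ v ≤ K := by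
                intro v hv
                rcases List.mem_append.mp hv with hv' | hv'
                · exact hmidb v hv'
                · rcases List.mem_singleton.mp hv' with rfl
                  have h6 := (hb a hamem).1
                  have h7 := (hb b hbmem).1
                  omega
              have hsum' : (mid ++ [b + a]).sum = (M : Int) * K := by
                rw [List.sum_append]; simp; omega
              rw [ih _ (c - a) M (by simp; omega) hpair' hb' hsum' (fun h => by simp at h)]
              have hneq : ((a :: rest).take ((a :: rest).length - M)).sum
                  = a + (mid.take (mid.length + 1 - M)).sum := by
                conv_lhs => rw [← hrest]
                exact take_cons_append_sum hM1 hMle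
              have hneq' : ((mid ++ [b + a]).take ((mid ++ [b + a]).length - M)).sum
                  = (mid.take (mid.length + 1 - M)).sum := by
                have hidx : (mid ++ [b + a]).length - M = mid.length + 1 - M := by simp
                rw [hidx]
                exact take_append_singleton_sum (by omega)
              rw [hneq, hneq']
              exact if_congr ⟨fun h => by omega, fun h => by omega⟩ rfl rfl

lemma dvd_sum_sub_map_reduceK {K : Int} (hK : 0 < K) (l : List Int) :
    K ∣ (l.sum - (l.map (reduceK K)).sum) := by
  induction l with
  | nil => simp
  | cons a rest ih =>
    simp only [List.sum_cons, List.map_cons]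
    have h1 := reduceK_dvd_sub (v := a) hK
    have h2 : a + rest.sum - (reduceK K a + (rest.map (reduceK K)).sum)
        = (a - reduceK K a) + (rest.sum - (rest.map (reduceK K)).sum) := by ring
    rw [h2]
    exact dvd_add h1 ih

lemma stripZeros_sum (l : List Int) : (stripZeros l).sum = l.sum := by
  obtain ⟨z, hz⟩ := stripZeros_decomp l
  conv_rhs => rw [hz]
  simp

-- ===== VERDICT (by name: the statement is the Claim_ definition above) =====
theorem solve_spec : Claim_equal_solve := by
  intro N K T arr hdom hpre
  obtain ⟨hKne, hpre2⟩ := hpre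
  unfold Spec_solve
  by_cases hmod : PySem.Int.mod arr.sum K = 0
  case neg =>
    unfold solve solve_alt
    rw [if_pos hmod, if_pos hmod]
  case pos =>
    rcases hpre2 with hmodne | ⟨hK, hne, hnn, hT⟩
    · exact absurd hmod hmodne
    have hdvd : K ∣ arr.sum := (PySem.Int.mod_eq_zero_iff_dvd _ _).mp hmod
    set s := PySem.List.sorted arr (fun x => x) with hs
    set red := PySem.List.sorted (arr.map (reduceK K)) (fun x => x) with hredd
    set st := stripZeros red with hstd
    -- facts about red
    have hredperm : red.Perm (arr.map (reduceK K)) := PySem.List.sorted_perm _ _ _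
    have hredp : red.Pairwise (· ≤ ·) := by
      simpa using PySem.List.sorted_pairwise (arr.map (reduceK K)) (fun x => x)
    have hredmem : ∀ v ∈ red, 0 ≤ v ∧ v ≤ K := by
      intro v hv
      obtain ⟨w, hw, rfl⟩ := List.mem_map.mp (hredperm.mem_iff.mp hv)
      exact reduceK_bounds hK (hnn w hw)
    have hredsum : red.sum = (arr.map (reduceK K)).sum := hredperm.sum_eq
    have hdvd2 : K ∣ red.sum := by
      have h1 := dvd_sum_sub_map_reduceK hK arr
      have h2 := dvd_sub hdvd h1
      rw [hredsum]
      simpa using h2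
    have hredsum_nn : 0 ≤ red.sum :=
      List.sum_nonneg (fun v hv => (hredmem v hv).1)
    obtain ⟨q, hq⟩ := hdvd2
    have hq0 : 0 ≤ q := by nlinarith
    have hqM : ((q.toNat : Int)) = q := Int.toNat_of_nonneg hq0
    -- facts about st
    obtain ⟨z, hz⟩ := stripZeros_decomp red
    rw [← hstd] at hz
    have hstsub : st.Sublist red := by
      conv_rhs => rw [hz]
      exact List.sublist_append_right _ _
    have hstp : st.Pairwise (· ≤ ·) := hredp.sublist hstsub
    have hstb : ∀ v ∈ st, 0 < v ∧ v ≤ K := fun v hv =>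
      ⟨stripZeros_pos hredp (fun x hx => (hredmem x hx).1) v hv,
       (hredmem v (hstsub.mem hv)).2⟩
    have hstsum : st.sum = red.sum := stripZeros_sum red
    have hstsum' : st.sum = ((q.toNat : Int)) * K := by
      rw [hstsum, hq, hqM]; ring
    have hMst : q.toNat ≤ st.length :=
      M_le_length hK (fun v hv => (hstb v hv).2) hstsum'
    have hemp : st = [] → 0 ≤ T := by
      intro h0
      rcases hT with h | h
      · exact h
      · obtain ⟨v, hv, hvne⟩ := h
        have hvpos : 0 < v := lt_of_le_of_ne (hnn v hv) (Ne.symm hvne)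
        have hmem : reduceK K v ∈ red :=
          (PySem.List.mem_sorted _ _ _ _).mpr (List.mem_map_of_mem hv)
        rw [hz, h0] at hmem
        simp only [List.append_nil] at hmem
        have := List.eq_of_mem_replicate hmem
        have := reduceK_pos hK hvpos
        omega
    -- A side
    have hA : solve N K T arr = if (st.take (st.length - q.toNat)).sum ≤ T then "YES" else "NO" := by
      unfold solve
      rw [if_neg (by simpa using hmod)]
      show loopA K T (stripZeros (phase1 K (phase1Fuel K s) s)) = _
      have h1 : phase1 K (phase1Fuel K s) s
          = PySem.List.sorted (s.map (reduceK K)) (fun x => x) :=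
        phase1_eq hK _ _ (by simpa using PySem.List.sorted_pairwise arr (fun x => x)) le_rfl
      have h1' : PySem.List.sorted (s.map (reduceK K)) (fun x => x) = red := by
        rw [hredd]
        exact PySem.List.sorted_eq_sorted_of_perm _ _ _ (fun a b h => h)
          ((PySem.List.sorted_perm arr (fun x => x) false).map _)
      rw [h1, h1', ← hstd]
      exact loopA_eq hK st.length st T q.toNat le_rfl hstp hstb hstsum' hemp
    -- B side
    have hB : solve_alt N K T arr = if (st.take (st.length - q.toNat)).sum ≤ T then "YES" else "NO" := by
      unfold solve_alt
      rw [if_neg (by simpa using hmod)]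
      show (if (PySem.List.slice red none
          (some ((red.length : Int) - PySem.Int.floordiv red.sum K))).sum ≤ T
        then "YES" else "NO") = _
      have hm : PySem.Int.floordiv red.sum K = ((q.toNat : Int)) := by
        rw [PySem.Int.floordiv_eq_ediv_of_pos hK, hq,
            Int.mul_ediv_cancel_left _ (by omega : K ≠ 0)]
        exact hqM.symm
      rw [hm]
      have hlenz : red.length = z + st.length := by rw [hz]; simp
      have hnn2 : 0 ≤ (red.length : Int) - ((q.toNat : Int)) := by
        rw [hlenz]; push_cast; omega
      rw [PySem.List.slice_to _ hnn2]
      have htoNat : ((red.length : Int) - ((q.toNat : Int))).toNat = z + (st.length - q.toNat) := by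
        rw [hlenz]; omega
      rw [htoNat]
      conv_lhs => rw [hz]
      rw [List.take_append, List.take_of_length_le (by simp),
          List.sum_append, List.sum_replicate]
      simp only [List.length_replicate, smul_zero, zero_add, Nat.add_sub_cancel_left]
    rw [hA, hB]
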